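-- pv_equiv track=rewrite | github.com/rougepavan/Python | 3rd day3.py | num_good_pairs
-- ===== SOURCE A (Python) =====
-- def num_good_pairs(nums):
--     freq_map = {}
--     good_pairs = 0
--     for num in nums:
--         if num in freq_map:
--             freq_map[num] += 1
--         else:
--             freq_map[num] = 1
--     for freq in freq_map.values():
--         good_pairs += (freq * (freq - 1)) // 2
--     return good_pairs
-- ===== SOURCE B (Python) =====
-- def num_good_pairs(nums):
--     counts = {}
--     good_pairs = 0
--     for num in nums:
--         c = counts.get(num, 0)
--         good_pairs += c
--         counts[num] = c + 1
--     return good_pairs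
-- ===== Notes on version B (the rewrite author's own statement) =====
-- stated objective: simpler
-- what changed: Single pass that adds the running count of each value to the answer before incrementing it, eliminating the second loop over the frequency map and the freq*(freq-1)//2 formula.
import Mathlib
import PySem

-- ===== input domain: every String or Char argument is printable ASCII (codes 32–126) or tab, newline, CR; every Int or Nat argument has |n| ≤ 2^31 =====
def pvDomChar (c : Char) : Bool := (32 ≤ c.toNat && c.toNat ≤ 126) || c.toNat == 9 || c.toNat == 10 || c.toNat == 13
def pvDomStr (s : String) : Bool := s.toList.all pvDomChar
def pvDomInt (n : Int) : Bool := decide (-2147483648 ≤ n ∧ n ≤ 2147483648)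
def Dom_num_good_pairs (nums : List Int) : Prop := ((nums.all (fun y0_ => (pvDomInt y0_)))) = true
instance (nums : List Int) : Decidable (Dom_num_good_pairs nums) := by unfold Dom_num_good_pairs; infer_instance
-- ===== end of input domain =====

-- B replaces A's two-phase count-then-formula with a single pass that adds the running
-- count of each value before incrementing it; same results, no second loop or formula.


-- ===== PORT A =====
-- first loop of A: build the frequency map
def npgFreqStep (d : PySem.Dict Int Int) (num : Int) : PySem.Dict Int Int :=
  if d.contains num then d.insert num (d.getD num 0 + 1)
  else d.insert num 1

def num_good_pairs (nums : List Int) : Int :=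
  let freq_map : PySem.Dict Int Int := nums.foldl npgFreqStep PySem.Dict.empty
  freq_map.values.foldl (fun good_pairs freq =>
    good_pairs + PySem.Int.floordiv (freq * (freq - 1)) 2) 0

-- ===== PORT B =====
-- one iteration of B's single pass: (counts, good_pairs) -> updated pair
def npgAltStep (st : PySem.Dict Int Int × Int) (num : Int) : PySem.Dict Int Int × Int :=
  let c := st.1.getD num 0
  (st.1.insert num (c + 1), st.2 + c)

def num_good_pairs_alt (nums : List Int) : Int :=
  (nums.foldl npgAltStep ((PySem.Dict.empty : PySem.Dict Int Int), (0 : Int))).2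

-- ===== PRECONDITION & SPEC =====
def Spec_num_good_pairs (nums : List Int) (out : Int) : Prop := out = num_good_pairs_alt nums
instance (nums : List Int) (out : Int) : Decidable (Spec_num_good_pairs nums out) := by unfold Spec_num_good_pairs; infer_instance

-- ===== CLAIM (what is proved, stated in full; the proofs are below) =====
def Claim_equal_num_good_pairs : Prop := ∀ (nums : List Int), Dom_num_good_pairs nums → Spec_num_good_pairs nums (num_good_pairs nums)

-- ===== LEMMAS AND PROOFS =====

-- f choose 2 as A computes it
def choose2 (f : Int) : Int := PySem.Int.floordiv (f * (f - 1)) 2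

-- sum of choose2 over a dict's entries
def sumCh (d : PySem.Dict Int Int) : Int := (d.items.map (fun p => choose2 p.2)).sum

theorem choose2_succ (c : Int) : choose2 (c + 1) = choose2 c + c := by
  unfold choose2
  rw [PySem.Int.floordiv_eq_ediv_of_pos (by norm_num),
      PySem.Int.floordiv_eq_ediv_of_pos (by norm_num)]
  obtain ⟨m, hm⟩ := Int.even_mul_pred_self c
  have h2 : c * (c - 1) = 2 * m := by linarith
  have h1 : (c + 1) * ((c + 1) - 1) = 2 * (m + c) := by
    have : (c + 1) * ((c + 1) - 1) = c * (c - 1) + 2 * c := by ring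
    rw [this, h2]; ring
  rw [h1, h2, Int.mul_ediv_cancel_left _ (by norm_num : (2:Int) ≠ 0),
      Int.mul_ediv_cancel_left _ (by norm_num : (2:Int) ≠ 0)]

-- replacing the (unique) entry at key x by (x, c+1) shifts the choose2-sum by choose2(c+1) - choose2 c
theorem sum_map_replace (ps : List (Int × Int)) (x c : Int)
    (hnd : (ps.map Prod.fst).Nodup) (hmem : (x, c) ∈ ps) :
    ((ps.map (fun p => if p.1 == x then (x, c + 1) else p)).map (fun p => choose2 p.2)).sum
      = (ps.map (fun p => choose2 p.2)).sum + choose2 (c + 1) - choose2 c := by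
  induction ps with
  | nil => simp at hmem
  | cons q ps ih =>
    simp only [List.map_cons, List.nodup_cons, List.mem_map] at hnd
    rcases List.mem_cons.mp hmem with hq | hmem'
    · subst hq
      have hps : ps.map (fun p => if (p.1 == x) = true then (x, c + 1) else p) = ps := by
        rw [List.map_congr_left (g := id) (by
          intro p hp
          have hne : p.1 ≠ x := fun h => hnd.1 ⟨p, hp, h⟩
          simp [hne]), List.map_id]
      rw [List.map_cons, if_pos (by simp : ((((x, c) : Int × Int).1 == x) = true)), hps,
          List.map_cons, List.sum_cons, List.map_cons, List.sum_cons]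
      simp only []
      ring
    · have hq1 : q.1 ≠ x := fun h => hnd.1 ⟨(x, c), hmem', h.symm⟩
      rw [List.map_cons, if_neg (by simp [hq1])]
      simp only [List.map_cons, List.sum_cons]
      rw [ih hnd.2 hmem']
      ring

theorem insert_sumCh (d : PySem.Dict Int Int) (x : Int) (hnd : d.keys.Nodup) :
    sumCh (d.insert x (d.getD x 0 + 1)) = sumCh d + d.getD x 0 := by
  by_cases hc : d.contains x = true
  · have hg : d.get? x = some (d.getD x 0) := by
      rw [PySem.Dict.contains_eq_isSome_get?] at hc
      cases hget : d.get? x with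
      | none => rw [hget] at hc; simp at hc
      | some v => rw [PySem.Dict.getD_eq_get?_getD, hget]; rfl
    have hmem := PySem.Dict.mem_items_of_get?_eq_some d hg
    unfold sumCh
    rw [PySem.Dict.items_insert_of_contains d _ hc]
    have hnd' : (d.items.map Prod.fst).Nodup := hnd
    rw [sum_map_replace d.items x (d.getD x 0) hnd' hmem, choose2_succ]
    ring
  · have hc' : d.contains x = false := by simpa using hc
    have h0 : d.getD x 0 = 0 := PySem.Dict.getD_of_not_contains d 0 hc'
    unfold sumCh
    rw [PySem.Dict.items_insert_of_not_contains d _ hc', h0]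
    simp [choose2, PySem.Int.floordiv]

-- A's frequency-map step equals the dict component of B's step
theorem stepA_eq (d : PySem.Dict Int Int) (x : Int) :
    npgFreqStep d x = d.insert x (d.getD x 0 + 1) := by
  unfold npgFreqStep
  by_cases hc : d.contains x = true
  · simp [hc]
  · have hc' : d.contains x = false := by simpa using hc
    rw [if_neg (by simp [hc']), PySem.Dict.getD_of_not_contains d 0 hc']
    norm_num

-- main invariant: B's accumulator tracks the choose2-sum of the growing dict
theorem npg_invariant (l : List Int) : ∀ (d : PySem.Dict Int Int) (g : Int), d.keys.Nodup →
    (l.foldl npgAltStep (d, g)).2 + sumCh d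
      = g + sumCh (l.foldl (fun d x => d.insert x (d.getD x 0 + 1)) d) := by
  induction l with
  | nil => intro d g _; simp
  | cons x l ih =>
    intro d g hnd
    have hstep : npgAltStep (d, g) x = (d.insert x (d.getD x 0 + 1), g + d.getD x 0) := rfl
    have hnd' : (d.insert x (d.getD x 0 + 1)).keys.Nodup :=
      PySem.Dict.nodup_keys_insert d x _ hnd
    rw [List.foldl_cons, List.foldl_cons, hstep]
    have hih := ih (d.insert x (d.getD x 0 + 1)) (g + d.getD x 0) hnd'
    have hins := insert_sumCh d x hnd
    omega

theorem num_good_pairs_eq_alt (nums : List Int) :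
    num_good_pairs nums = num_good_pairs_alt nums := by
  show (List.foldl (fun good_pairs freq => good_pairs + PySem.Int.floordiv (freq * (freq - 1)) 2) 0
      (List.foldl npgFreqStep PySem.Dict.empty nums).values)
    = (List.foldl npgAltStep (PySem.Dict.empty, 0) nums).2
  have hfold : nums.foldl npgFreqStep (PySem.Dict.empty : PySem.Dict Int Int)
      = nums.foldl (fun d x => d.insert x (d.getD x 0 + 1)) PySem.Dict.empty := by
    congr 1
    funext d x
    exact stepA_eq d x
  rw [hfold, PySem.List.foldl_add
      ((List.foldl (fun (d : PySem.Dict Int Int) x => d.insert x (d.getD x 0 + 1)) PySem.Dict.empty nums).values)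
      (fun freq => PySem.Int.floordiv (freq * (freq - 1)) 2) 0]
  have hinv := npg_invariant nums PySem.Dict.empty 0 (by simp [PySem.Dict.keys, PySem.Dict.empty])
  have hsum0 : sumCh PySem.Dict.empty = 0 := by simp [sumCh, PySem.Dict.empty]
  rw [hsum0] at hinv
  have hv : ((nums.foldl (fun d x => d.insert x (d.getD x 0 + 1)) PySem.Dict.empty).values.map
      (fun freq => PySem.Int.floordiv (freq * (freq - 1)) 2)).sum
      = sumCh (nums.foldl (fun d x => d.insert x (d.getD x 0 + 1)) PySem.Dict.empty) := by
    unfold sumCh choose2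
    simp only [PySem.Dict.values, List.map_map]
    rfl
  rw [hv]
  omega

-- ===== VERDICT (by name: the statement is the Claim_ definition above) =====
theorem num_good_pairs_spec : Claim_equal_num_good_pairs := by
  intro nums _
  unfold Spec_num_good_pairs
  exact num_good_pairs_eq_alt nums
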